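-- pv_equiv track=rewrite | github.com/Ztein/docsharvester | mcp_doc_getter/src/mcp_specific/mcp_handlers.py | postprocess_markdown
-- ===== SOURCE A (Python) =====
-- def postprocess_markdown(markdown_content: str) -> str:
--     """
--     Postprocess the Markdown content for MCP-specific elements.
--
--     Args:
--         markdown_content: The Markdown content
--
--     Returns:
--         The postprocessed Markdown content
--     """
--     # Add MCP-specific formatting or fixes to the markdown content
--
--     # Fix code block language specifiers
--     lines = markdown_content.splitlines()
--     in_code_block = False
--
--     for i, line in enumerate(lines):
--         if line.startswith('```') and not in_code_block:
--             in_code_block = True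
--             # If there's no language specified, add 'python' as default for MCP
--             if line == '```':
--                 lines[i] = '```python'
--         elif line.startswith('```') and in_code_block:
--             in_code_block = False
--
--     return '\n'.join(lines)
-- ===== SOURCE B (Python) =====
-- def _next_fence(lines, k):
--     """Index of the first fence line at or after k, or len(lines)."""
--     n = len(lines)
--     while k < n and not lines[k].startswith('```'):
--         k += 1
--     return k
--
--
-- def postprocess_markdown(markdown_content: str) -> str:
--     """Block-structured rewrite: jump from fence to fence with _next_fence and
--     copy the plain-text and code-body segments wholesale; only each opening
--     fence is inspected (relabelled to '```python' when bare)."""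
--     lines = markdown_content.splitlines()
--     out = []
--     n = len(lines)
--     k = 0
--     while k < n:
--         j = _next_fence(lines, k)
--         out.extend(lines[k:j])                   # plain text, verbatim
--         if j < n:
--             out.append('```python' if lines[j] == '```' else lines[j])  # opening fence
--             j2 = _next_fence(lines, j + 1)
--             out.extend(lines[j + 1:j2])          # code body, verbatim
--             if j2 < n:
--                 out.append(lines[j2])            # closing fence, verbatim
--             j = j2
--         k = j + 1
--     return '\n'.join(out)
-- ===== Notes on version B (the rewrite author's own statement) =====
-- stated objective: alternative
-- what changed: Replaces A's per-line scan with a carried in_code_block flag by a block-structured segment scan: a find-next-fence helper locates each opening/closing fence pair and the plain-text and code-body segments between them are copied wholesale; only opening fences are inspected.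
import Mathlib
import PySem

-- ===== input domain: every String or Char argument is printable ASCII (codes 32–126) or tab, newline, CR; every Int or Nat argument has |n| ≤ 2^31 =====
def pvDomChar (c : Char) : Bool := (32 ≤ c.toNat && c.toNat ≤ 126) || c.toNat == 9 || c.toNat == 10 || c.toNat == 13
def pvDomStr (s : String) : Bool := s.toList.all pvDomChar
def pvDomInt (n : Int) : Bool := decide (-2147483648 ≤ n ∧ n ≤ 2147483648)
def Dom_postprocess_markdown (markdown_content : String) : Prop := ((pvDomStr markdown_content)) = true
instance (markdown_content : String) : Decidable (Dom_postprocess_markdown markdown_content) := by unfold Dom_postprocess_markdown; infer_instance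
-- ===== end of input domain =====

-- B replaces A's per-line scan with a flag by a block-structured segment scan:
-- find the next fence, copy the segments between fences wholesale, relabel bare opening fences.

-- ===== PORT A =====
-- A's for-loop over lines with the in_code_block flag; list mutation becomes rebuilding the list.
def pvALoop : List String → Bool → List String
  | [], _ => []
  | line :: rest, inb =>
    if PySem.Str.startswith line "```" && !inb then
      (if line == "```" then "```python" else line) :: pvALoop rest true
    else if PySem.Str.startswith line "```" && inb then
      line :: pvALoop rest false
    else
      line :: pvALoop rest inb

def postprocess_markdown (markdown_content : String) : String :=
  PySem.Str.join "\n" (pvALoop (PySem.Str.splitlines markdown_content) false)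

-- ===== PORT B =====
-- B works with indices k, j, j2 into `lines` and copies slices lines[k:j], lines[j+1:j2];
-- the port carries the suffix of `lines` starting at the current index instead, so
-- _next_fence(lines, k) becomes pvSpan (splitting that suffix at the first fence line):
-- the returned pair is exactly (the slice copied verbatim, the rest from the fence on).
def pvSpan : List String → List String × List String
  | [] => ([], [])
  | l :: ls =>
    if PySem.Str.startswith l "```" then ([], l :: ls)
    else
      let (a, b) := pvSpan ls
      (l :: a, b)

theorem pvSpan_len (ls : List String) : (pvSpan ls).2.length ≤ ls.length := by
  induction ls with
  | nil => simp [pvSpan]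
  | cons l ls ih =>
    simp only [pvSpan]
    split_ifs with h
    · simp
    · simpa using Nat.le_succ_of_le ih

-- the outer while-loop of B: one iteration handles one plain-text segment,
-- one opening fence, one code-body segment and one closing fence.
def pvOuter (ls : List String) : List String :=
  match hs : pvSpan ls with
  | (pre, []) => pre
  | (pre, f :: rest) =>
    let opener := if f == "```" then "```python" else f
    match hs2 : pvSpan rest with
    | (body, []) => pre ++ opener :: body
    | (body, g :: rest2) => pre ++ opener :: (body ++ g :: pvOuter rest2)
termination_by ls.length
decreasing_by
  have h1 : (f :: rest).length ≤ ls.length := by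
    simpa [hs] using pvSpan_len ls
  have h2 : (g :: rest2).length ≤ rest.length := by
    simpa [hs2] using pvSpan_len rest
  simp at h1 h2; omega

def postprocess_markdown_alt (markdown_content : String) : String :=
  PySem.Str.join "\n" (pvOuter (PySem.Str.splitlines markdown_content))

-- ===== PRECONDITION & SPEC =====
def Spec_postprocess_markdown (markdown_content : String) (out : String) : Prop := out = postprocess_markdown_alt markdown_content
instance (markdown_content : String) (out : String) : Decidable (Spec_postprocess_markdown markdown_content out) := by unfold Spec_postprocess_markdown; infer_instance

-- ===== CLAIM (what is proved, stated in full; the proofs are below) =====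
def Claim_equal_postprocess_markdown : Prop := ∀ (markdown_content : String), Dom_postprocess_markdown markdown_content → Spec_postprocess_markdown markdown_content (postprocess_markdown markdown_content)

-- ===== LEMMAS AND PROOFS =====

-- the prefix returned by pvSpan consists of non-fence lines, so A's loop copies it
-- verbatim whatever the flag is
theorem pvALoop_span (ls : List String) (flag : Bool) :
    pvALoop ls flag = (pvSpan ls).1 ++ pvALoop (pvSpan ls).2 flag := by
  induction ls with
  | nil => simp [pvSpan, pvALoop]
  | cons l ls ih =>
    simp only [pvSpan]
    by_cases h : PySem.Str.startswith l "```" = true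
    · rw [if_pos h]; simp
    · have hb : PySem.Str.startswith l "```" = false := by simpa using h
      rw [if_neg h]
      simp only [pvALoop, hb, Bool.false_and, Bool.false_eq_true, if_false, List.cons_append]
      exact congrArg (l :: ·) ih

-- the suffix returned by pvSpan starts with a fence line (when non-empty)
theorem pvSpan_fence (ls : List String) (f : String) (rest : List String)
    (h : (pvSpan ls).2 = f :: rest) : PySem.Str.startswith f "```" = true := by
  induction ls with
  | nil => simp [pvSpan] at h
  | cons l ls ih =>
    simp only [pvSpan] at h
    by_cases hl : PySem.Str.startswith l "```" = true
    · rw [if_pos hl] at h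
      simp at h
      exact h.1 ▸ hl
    · rw [if_neg hl] at h
      exact ih (by simpa using h)

-- one step of A's loop at an opening fence / at a closing fence
theorem pvALoop_open (f : String) (rest : List String)
    (hf : PySem.Str.startswith f "```" = true) :
    pvALoop (f :: rest) false = (if f == "```" then "```python" else f) :: pvALoop rest true := by
  have hf' : PySem.Chars.startswith f.toList ['`', '`', '`'] = true := by simpa using hf
  simp [pvALoop, hf']

theorem pvALoop_close (g : String) (rest : List String)
    (hg : PySem.Str.startswith g "```" = true) :
    pvALoop (g :: rest) true = g :: pvALoop rest false := by
  have hg' : PySem.Chars.startswith g.toList ['`', '`', '`'] = true := by simpa using hg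
  simp [pvALoop, hg']

theorem pvMain (n : Nat) : ∀ ls : List String, ls.length ≤ n → pvOuter ls = pvALoop ls false := by
  induction n with
  | zero =>
    intro ls h
    have : ls = [] := List.eq_nil_of_length_eq_zero (Nat.le_zero.mp h)
    subst this; simp [pvOuter, pvSpan, pvALoop]
  | succ n ih =>
    intro ls hlen
    rw [pvALoop_span ls false]
    unfold pvOuter
    split
    · next pre hs => rw [hs]; simp [pvALoop]
    · next pre f rest hs =>
      rw [hs]
      have hf : PySem.Str.startswith f "```" = true := pvSpan_fence ls f rest (by rw [hs])
      have h1 : (f :: rest).length ≤ ls.length := by simpa [hs] using pvSpan_len ls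
      dsimp only
      rw [pvALoop_open f rest hf, pvALoop_span rest true]
      split
      · next body hs2 => rw [hs2]; simp [pvALoop]
      · next body g rest2 hs2 =>
        rw [hs2]
        have hg : PySem.Str.startswith g "```" = true := pvSpan_fence rest g rest2 (by rw [hs2])
        have h2 : (g :: rest2).length ≤ rest.length := by simpa [hs2] using pvSpan_len rest
        have hr2 : rest2.length ≤ n := by simp at h1 h2 hlen; omega
        rw [pvALoop_close g rest2 hg, ih rest2 hr2]

-- ===== VERDICT (by name: the statement is the Claim_ definition above) =====
theorem postprocess_markdown_spec : Claim_equal_postprocess_markdown := by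
  intro s _
  unfold Spec_postprocess_markdown postprocess_markdown postprocess_markdown_alt
  rw [pvMain (PySem.Str.splitlines s).length _ le_rfl]
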